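-- pv_equiv track=rewrite | github.com/MauriceCalvert/andante | subject_scorer.py | _contour_class
-- ===== SOURCE A (Python) =====
-- def _contour_class(ivs: tuple) -> str:
--     """Classify the contour shape of an interval sequence."""
--     pitches = [0]
--     for iv in ivs:
--         pitches.append(pitches[-1] + iv)
--     mid = len(pitches) // 2
--     mid_pitch = pitches[mid]
--     peak_pos = pitches.index(max(pitches))
--     trough_pos = pitches.index(min(pitches))
--     if mid_pitch > 0:
--         if trough_pos > mid:
--             return 'arch'
--         return 'rise_dip_fall'
--     elif mid_pitch == 0:
--         if peak_pos < mid: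
--             return 'plateau_fall'
--         return 'late_peak'
--     else:
--         if peak_pos > mid:
--             return 'valley_arch'
--         return 'descent'
-- ===== SOURCE B (Python) =====
-- def _contour_class(ivs: tuple) -> str:
--     """Classify the contour shape of an interval sequence."""
--     n = len(ivs)
--     mid = (n + 1) // 2          # len(pitches) == n + 1 because of the leading 0
--     mid_pitch = sum(ivs[:mid])  # pitch at the midpoint = sum of the first mid intervals
--     cum = 0
--     peak_val, peak_pos = 0, 0
--     trough_val, trough_pos = 0, 0
--     pos = 0
--     for iv in ivs:
--         cum += iv
--         pos += 1
--         if cum > peak_val:      # strictly greater keeps the FIRST occurrence of the max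
--             peak_val, peak_pos = cum, pos
--         if cum < trough_val:    # strictly less keeps the FIRST occurrence of the min
--             trough_val, trough_pos = cum, pos
--     if mid_pitch > 0:
--         if trough_pos > mid:
--             return 'arch'
--         return 'rise_dip_fall'
--     elif mid_pitch == 0:
--         if peak_pos < mid:
--             return 'plateau_fall'
--         return 'late_peak'
--     else:
--         if peak_pos > mid:
--             return 'valley_arch'
--         return 'descent'
-- ===== Notes on version B (the rewrite author's own statement) =====
-- stated objective: alternative
-- what changed: replaces the build-prefix-list-then-scan-it-three-times (max, min, index lookups) approach with a single accumulator pass over the intervals that tracks running sum, first peak and first trough positions, plus a direct slice-sum for the midpoint pitch, so no pitch list is ever materialised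
import Mathlib
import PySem

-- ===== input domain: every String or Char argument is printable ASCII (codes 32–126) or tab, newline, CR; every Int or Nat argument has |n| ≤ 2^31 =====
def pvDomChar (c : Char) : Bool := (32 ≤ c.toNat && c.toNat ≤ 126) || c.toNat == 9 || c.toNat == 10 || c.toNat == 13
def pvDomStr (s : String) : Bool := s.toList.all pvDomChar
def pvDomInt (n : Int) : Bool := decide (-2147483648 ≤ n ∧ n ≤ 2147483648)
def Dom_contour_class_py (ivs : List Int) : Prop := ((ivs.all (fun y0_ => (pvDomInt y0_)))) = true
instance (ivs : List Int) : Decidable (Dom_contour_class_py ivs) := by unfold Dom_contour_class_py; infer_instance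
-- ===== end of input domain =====

-- B replaces A's prefix-pitch list plus separate max/min/index scans by one accumulator pass
-- (running sum, first peak/trough positions) plus a slice-sum for the midpoint pitch: same values, O(1) extra space.

-- ===== PORT A =====
def contour_class_py (ivs : List Int) : String :=
  let pitches := ivs.foldl (fun ps iv => ps ++ [PySem.List.pyGetD ps (-1) 0 + iv]) [(0 : Int)]
  -- pitches[-1] via pyGetD 0: pitches is never empty, so this is exact
  let mid : Nat := pitches.length / 2   -- len(pitches)//2 on a nonnegative length: Nat division is exact
  let mid_pitch : Int := (PySem.List.pyGet? pitches (mid : Int)).getD 0   -- mid < len(pitches), never raises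
  let peak_pos : Nat := (PySem.List.index? pitches ((PySem.List.max? pitches (fun y => y)).getD 0)).getD 0
  let trough_pos : Nat := (PySem.List.index? pitches ((PySem.List.min? pitches (fun y => y)).getD 0)).getD 0
  if mid_pitch > 0 then
    if trough_pos > mid then "arch" else "rise_dip_fall"
  else if mid_pitch = 0 then
    if peak_pos < mid then "plateau_fall" else "late_peak"
  else
    if peak_pos > mid then "valley_arch" else "descent"

-- ===== PORT B =====
-- state: (cum, peak_val, peak_pos, trough_val, trough_pos, pos)
def pvStepB (st : Int × Int × Nat × Int × Nat × Nat) (iv : Int) : Int × Int × Nat × Int × Nat × Nat :=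
  let cum := st.1 + iv
  let pos := st.2.2.2.2.2 + 1
  let pk := if cum > st.2.1 then (cum, pos) else (st.2.1, st.2.2.1)
  let tr := if cum < st.2.2.2.1 then (cum, pos) else (st.2.2.2.1, st.2.2.2.2.1)
  (cum, pk.1, pk.2, tr.1, tr.2, pos)

def contour_class_py_alt (ivs : List Int) : String :=
  let n := ivs.length
  let mid : Nat := (n + 1) / 2
  let mid_pitch : Int := (PySem.List.slice ivs none (some (mid : Int))).sum
  let st := ivs.foldl pvStepB (0, 0, 0, 0, 0, 0)
  let peak_pos : Nat := st.2.2.1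
  let trough_pos : Nat := st.2.2.2.2.1
  if mid_pitch > 0 then
    if trough_pos > mid then "arch" else "rise_dip_fall"
  else if mid_pitch = 0 then
    if peak_pos < mid then "plateau_fall" else "late_peak"
  else
    if peak_pos > mid then "valley_arch" else "descent"

-- ===== PRECONDITION & SPEC =====
def Spec_contour_class_py (ivs : List Int) (out : String) : Prop := out = contour_class_py_alt ivs
instance (ivs : List Int) (out : String) : Decidable (Spec_contour_class_py ivs out) := by unfold Spec_contour_class_py; infer_instance

-- ===== CLAIM (what is proved, stated in full; the proofs are below) =====
def Claim_equal_contour_class_py : Prop := ∀ (ivs : List Int), Dom_contour_class_py ivs → Spec_contour_class_py ivs (contour_class_py ivs)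

-- ===== LEMMAS AND PROOFS =====

-- the successive pitch values after a current pitch c, one per interval
def pvVals (c : Int) : List Int → List Int
  | [] => []
  | iv :: r => (c + iv) :: pvVals (c + iv) r

def pvMaxOf (a : Int) (t : List Int) : Int := t.foldl max a
def pvMinOf (a : Int) (t : List Int) : Int := t.foldl min a
def pvArg (l : List Int) (v : Int) : Nat := (PySem.List.index? l v).getD 0

lemma pvVals_length (ivs : List Int) : ∀ c, (pvVals c ivs).length = ivs.length := by
  induction ivs with
  | nil => intro c; simp [pvVals]
  | cons iv r ih => intro c; simp [pvVals, ih]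

lemma foldA_eq (ivs : List Int) : ∀ (ps : List Int) (c : Int),
    List.foldl (fun ps iv => ps ++ [PySem.List.pyGetD ps (-1) 0 + iv]) (ps ++ [c]) ivs
      = ps ++ c :: pvVals c ivs := by
  induction ivs with
  | nil => intro ps c; simp [pvVals]
  | cons iv r ih =>
      intro ps c
      simp only [List.foldl_cons, PySem.List.pyGetD_neg_one_append_singleton, pvVals]
      have := ih (ps ++ [c]) (c + iv)
      simpa using this

lemma pvVals_get (ivs : List Int) : ∀ (c : Int) (k : Nat), k ≤ ivs.length →
    (c :: pvVals c ivs)[k]? = some (c + (ivs.take k).sum) := by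
  induction ivs with
  | nil =>
      intro c k hk
      cases k with
      | zero => simp [pvVals]
      | succ k => simp at hk
  | cons iv r ih =>
      intro c k hk
      cases k with
      | zero => simp
      | succ k =>
          have := ih (c + iv) k (by simpa using hk)
          simp only [pvVals, List.getElem?_cons_succ]
          rw [this]
          simp [add_assoc]

lemma max_mem_cons (a : Int) (t : List Int) : pvMaxOf a t ∈ a :: t := by
  have h : PySem.List.max? (a :: t) (fun y => y) = some (t.foldl max a) :=
    PySem.List.max?_id_cons a t
  exact PySem.List.max?_mem h

lemma le_max_cons (a : Int) (t : List Int) : ∀ x ∈ a :: t, x ≤ pvMaxOf a t := by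
  intro x hx
  have h : PySem.List.max? (a :: t) (fun y => y) = some (t.foldl max a) :=
    PySem.List.max?_id_cons a t
  exact PySem.List.max?_isMax h x hx

lemma min_mem_cons (a : Int) (t : List Int) : pvMinOf a t ∈ a :: t := by
  have h : PySem.List.min? (a :: t) (fun y => y) = some (t.foldl min a) :=
    PySem.List.min?_id_cons a t
  exact PySem.List.min?_mem h

lemma min_le_cons (a : Int) (t : List Int) : ∀ x ∈ a :: t, pvMinOf a t ≤ x := by
  intro x hx
  have h : PySem.List.min? (a :: t) (fun y => y) = some (t.foldl min a) :=
    PySem.List.min?_id_cons a t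
  exact PySem.List.min?_isMin h x hx

lemma argmax_append (a v : Int) (t : List Int) :
    pvArg ((a :: t) ++ [v]) (pvMaxOf a (t ++ [v]))
      = if pvMaxOf a t < v then (a :: t).length else pvArg (a :: t) (pvMaxOf a t) := by
  have hmax : pvMaxOf a (t ++ [v]) = max (pvMaxOf a t) v := by
    simp [pvMaxOf]
  by_cases h : pvMaxOf a t < v
  · have hnm : v ∉ a :: t := by
      intro hv
      exact absurd (le_max_cons a t v hv) (by omega)
    have : PySem.List.index? ((a :: t) ++ [v]) v = some (a :: t).length :=
      PySem.List.index?_append_singleton_self (a :: t) v hnm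
    rw [hmax, max_eq_right (le_of_lt h)]
    unfold pvArg
    simp only [List.cons_append] at this ⊢
    rw [this]
    simp [h]
  · have hm : pvMaxOf a t ∈ a :: t := max_mem_cons a t
    have : PySem.List.index? ((a :: t) ++ [v]) (pvMaxOf a t)
        = PySem.List.index? (a :: t) (pvMaxOf a t) :=
      PySem.List.index?_append_of_mem [v] hm
    rw [hmax, max_eq_left (by omega)]
    unfold pvArg
    simp only [List.cons_append] at this ⊢
    rw [this]
    simp [h]

lemma argmin_append (a v : Int) (t : List Int) :
    pvArg ((a :: t) ++ [v]) (pvMinOf a (t ++ [v]))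
      = if v < pvMinOf a t then (a :: t).length else pvArg (a :: t) (pvMinOf a t) := by
  have hmin : pvMinOf a (t ++ [v]) = min (pvMinOf a t) v := by
    simp [pvMinOf]
  by_cases h : v < pvMinOf a t
  · have hnm : v ∉ a :: t := by
      intro hv
      exact absurd (min_le_cons a t v hv) (by omega)
    have : PySem.List.index? ((a :: t) ++ [v]) v = some (a :: t).length :=
      PySem.List.index?_append_singleton_self (a :: t) v hnm
    rw [hmin, min_eq_right (le_of_lt h)]
    unfold pvArg
    simp only [List.cons_append] at this ⊢
    rw [this]
    simp [h]
  · have hm : pvMinOf a t ∈ a :: t := min_mem_cons a t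
    have : PySem.List.index? ((a :: t) ++ [v]) (pvMinOf a t)
        = PySem.List.index? (a :: t) (pvMinOf a t) :=
      PySem.List.index?_append_of_mem [v] hm
    rw [hmin, min_eq_left (by omega)]
    unfold pvArg
    simp only [List.cons_append] at this ⊢
    rw [this]
    simp [h]

-- the B loop, started from the summary of a seen prefix list a :: t, ends in the summary of the full list
lemma foldB_eq (ivs : List Int) : ∀ (a : Int) (t : List Int),
    List.foldl pvStepB
      ((a :: t).getLast (List.cons_ne_nil a t),
        pvMaxOf a t, pvArg (a :: t) (pvMaxOf a t),
        pvMinOf a t, pvArg (a :: t) (pvMinOf a t), t.length) ivs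
      = (let t' := t ++ pvVals ((a :: t).getLast (List.cons_ne_nil a t)) ivs
         ((a :: t').getLast (List.cons_ne_nil a t'),
           pvMaxOf a t', pvArg (a :: t') (pvMaxOf a t'),
           pvMinOf a t', pvArg (a :: t') (pvMinOf a t'), t'.length)) := by
  induction ivs with
  | nil => intro a t; simp [pvVals]
  | cons iv r ih =>
      intro a t
      set c := (a :: t).getLast (List.cons_ne_nil a t) with hc
      have hstep : pvStepB (c, pvMaxOf a t, pvArg (a :: t) (pvMaxOf a t),
            pvMinOf a t, pvArg (a :: t) (pvMinOf a t), t.length) iv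
          = ((a :: (t ++ [c + iv])).getLast (List.cons_ne_nil _ _),
             pvMaxOf a (t ++ [c + iv]), pvArg (a :: (t ++ [c + iv])) (pvMaxOf a (t ++ [c + iv])),
             pvMinOf a (t ++ [c + iv]), pvArg (a :: (t ++ [c + iv])) (pvMinOf a (t ++ [c + iv])),
             (t ++ [c + iv]).length) := by
        have hg : (a :: (t ++ [c + iv])).getLast (List.cons_ne_nil _ _) = c + iv := by
          simp
        have hmx : pvMaxOf a (t ++ [c + iv]) = max (pvMaxOf a t) (c + iv) := by
          simp [pvMaxOf]
        have hmn : pvMinOf a (t ++ [c + iv]) = min (pvMinOf a t) (c + iv) := by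
          simp [pvMinOf]
        have hax := argmax_append a (c + iv) t
        have han := argmin_append a (c + iv) t
        simp only [List.cons_append] at hax han
        simp only [pvStepB]
        rw [hax, han, hmx, hmn, hg]
        simp only [List.length_append, List.length_cons, List.length_nil]
        split_ifs <;> simp [Prod.ext_iff, max_def, min_def] <;> omega
      have hlast : (a :: (t ++ [c + iv])).getLast (List.cons_ne_nil _ _) = c + iv := by
        simp
      calc List.foldl pvStepB _ (iv :: r)
          = List.foldl pvStepB ((a :: (t ++ [c + iv])).getLast (List.cons_ne_nil _ _),
              pvMaxOf a (t ++ [c + iv]), pvArg (a :: (t ++ [c + iv])) (pvMaxOf a (t ++ [c + iv])),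
              pvMinOf a (t ++ [c + iv]), pvArg (a :: (t ++ [c + iv])) (pvMinOf a (t ++ [c + iv])),
              (t ++ [c + iv]).length) r := by rw [List.foldl_cons, hstep]
        _ = _ := by
              rw [ih a (t ++ [c + iv])]
              simp only [hlast]
              have : (t ++ [c + iv]) ++ pvVals (c + iv) r = t ++ pvVals c (iv :: r) := by
                simp [pvVals]
              simp [this]

-- ===== VERDICT (by name: the statement is the Claim_ definition above) =====
theorem contour_class_py_spec : Claim_equal_contour_class_py := by
  intro ivs _
  unfold Spec_contour_class_py contour_class_py contour_class_py_alt
  have hA : List.foldl (fun ps iv => ps ++ [PySem.List.pyGetD ps (-1) 0 + iv]) [(0 : Int)] ivs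
      = 0 :: pvVals 0 ivs := by
    simpa using foldA_eq ivs [] 0
  have hB := foldB_eq ivs 0 []
  simp only [List.nil_append] at hB
  have hlen : (pvVals 0 ivs).length = ivs.length := pvVals_length ivs 0
  have hmid : ((0 :: pvVals 0 ivs).length) / 2 = (ivs.length + 1) / 2 := by
    simp [hlen]
  have hmidle : (ivs.length + 1) / 2 ≤ ivs.length := by omega
  have hget : (PySem.List.pyGet? (0 :: pvVals 0 ivs) (((0 :: pvVals 0 ivs).length / 2 : Nat) : Int)).getD 0
      = (PySem.List.slice ivs none (some (((ivs.length + 1) / 2 : Nat) : Int))).sum := by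
    rw [PySem.List.pyGet?_natCast, hmid, pvVals_get ivs 0 _ hmidle,
        PySem.List.slice_to_natCast]
    simp
  have hmax : (PySem.List.max? (0 :: pvVals 0 ivs) (fun y => y)).getD 0 = pvMaxOf 0 (pvVals 0 ivs) := by
    rw [PySem.List.max?_id_cons]; rfl
  have hmin : (PySem.List.min? (0 :: pvVals 0 ivs) (fun y => y)).getD 0 = pvMinOf 0 (pvVals 0 ivs) := by
    rw [PySem.List.min?_id_cons]; rfl
  rw [hA]
  simp only [hget, hmax, hmin]
  have h0 : pvMaxOf (0:Int) ([] : List Int) = 0 := rfl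
  have h0' : pvMinOf (0:Int) ([] : List Int) = 0 := rfl
  have harg : pvArg [(0:Int)] 0 = 0 := by simp [pvArg]
  rw [show ((0:Int), (0:Int), (0:Nat), (0:Int), (0:Nat), (0:Nat))
      = (((0:Int) :: ([]:List Int)).getLast (List.cons_ne_nil _ _),
         pvMaxOf 0 [], pvArg [(0:Int)] (pvMaxOf 0 []),
         pvMinOf 0 [], pvArg [(0:Int)] (pvMinOf 0 []), ([] : List Int).length) from by
      simp [pvMaxOf, pvMinOf, harg]]
  rw [hB]
  simp only [hmid, pvArg]
  rfl
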